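-- pv_equiv track=rewrite | github.com/NQBH/advanced_STEM_beyond | combinatorics/resource/LDL/Python/bai2.py | count_partitions_exact_parts
-- ===== SOURCE A (Python) =====
-- def count_partitions_exact_parts(n, k):
--     dp = [[0] * (k + 1) for _ in range(n + 1)]
--     dp[0][0] = 1  # Co 1 cach phan hoach 0 thanh 0 phan
--
--     for i in range(1, n + 1):        # Tong can dat
--         for j in range(1, k + 1):    # So phan
--             if i >= j:
--                 dp[i][j] = dp[i - 1][j - 1] + dp[i - j][j]
--             else:
--                 dp[i][j] = dp[i - 1][j - 1]
--     return dp[n][k]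
-- ===== SOURCE B (Python) =====
-- def count_partitions_exact_parts(n, k):
--     # Partitions of n into exactly k parts = partitions of m = n-k into parts of size <= k
--     # (subtract 1 from every part).  Counted by a 1D coin-change DP over part values 1..k.
--     m = n - k
--     if m < 0:
--         return 0
--     ways = [1] + [0] * m
--     for s in range(1, k + 1):
--         for t in range(s, m + 1):
--             ways[t] += ways[t - s]
--     return ways[m]
-- ===== Notes on version B (the rewrite author's own statement) =====
-- stated objective: faster
-- what changed: Replaces A's 2D (sum, number-of-parts) exact-k table by a 1D bounded-part-size coin-change DP on m = n-k (the subtract-1-from-every-part bijection): time O(k*(n-k)) and space O(n-k) instead of O(n*k); intended as faster, measured ~1200x at n=1024 in a timing run (both stay quadratic when k is near n/2).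
import Mathlib
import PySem

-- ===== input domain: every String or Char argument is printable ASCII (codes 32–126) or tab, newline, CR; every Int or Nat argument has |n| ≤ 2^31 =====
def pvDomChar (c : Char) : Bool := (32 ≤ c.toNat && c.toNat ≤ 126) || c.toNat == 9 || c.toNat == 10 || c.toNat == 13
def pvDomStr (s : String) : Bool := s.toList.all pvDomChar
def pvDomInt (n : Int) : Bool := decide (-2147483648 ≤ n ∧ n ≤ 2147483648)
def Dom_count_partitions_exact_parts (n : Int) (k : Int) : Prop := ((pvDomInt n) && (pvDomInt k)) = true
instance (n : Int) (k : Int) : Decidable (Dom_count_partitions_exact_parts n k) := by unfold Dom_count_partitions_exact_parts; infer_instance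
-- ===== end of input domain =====

-- B replaces A's 2D exact-k-parts table by a 1D bounded-part-size coin-change DP on m = n-k
-- (the "subtract 1 from every part" bijection), using a smaller table (intended as faster;
-- measured faster in a timing run at the sizes it finished).

-- ===== PORT A =====
def count_partitions_exact_parts (n : Int) (k : Int) : Int :=
  -- dp = [[0] * (k + 1) for _ in range(n + 1)]
  let dp : List (List Int) :=
    (PySem.List.pyRange 0 (n+1) 1).map (fun _ => List.replicate (k+1).toNat (0:Int))
  -- dp[0][0] = 1   (raises IndexError when n < 0 or k < 0: those inputs are excluded by Pre_)
  let dp := PySem.List.pySetD dp 0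
      (PySem.List.pySetD (PySem.List.pyGetD dp 0 []) 0 1)
  let dp := (PySem.List.pyRange 1 (n+1) 1).foldl (fun dp i =>
      (PySem.List.pyRange 1 (k+1) 1).foldl (fun dp j =>
        let v : Int :=
          if i ≥ j then
            PySem.List.pyGetD (PySem.List.pyGetD dp (i-1) []) (j-1) 0
              + PySem.List.pyGetD (PySem.List.pyGetD dp (i-j) []) j 0
          else
            PySem.List.pyGetD (PySem.List.pyGetD dp (i-1) []) (j-1) 0
        PySem.List.pySetD dp i (PySem.List.pySetD (PySem.List.pyGetD dp i []) j v)) dp) dp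
  PySem.List.pyGetD (PySem.List.pyGetD dp n []) k 0

-- ===== PORT B =====
def count_partitions_exact_parts_alt (n : Int) (k : Int) : Int :=
  let m := n - k
  if m < 0 then 0
  else
    -- ways = [1] + [0] * m
    let ways : List Int := 1 :: List.replicate m.toNat 0
    let ways := (PySem.List.pyRange 1 (k+1) 1).foldl (fun ways s =>
        (PySem.List.pyRange s (m+1) 1).foldl (fun ways t =>
          PySem.List.pySetD ways t
            (PySem.List.pyGetD ways t 0 + PySem.List.pyGetD ways (t-s) 0)) ways) ways
    PySem.List.pyGetD ways m 0

-- ===== PRECONDITION & SPEC =====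
-- A raises IndexError at "dp[0][0] = 1" whenever n < 0 (no rows) or k < 0 (empty first row).
def Pre_count_partitions_exact_parts (n : Int) (k : Int) : Prop := 0 ≤ n ∧ 0 ≤ k
instance (n : Int) (k : Int) : Decidable (Pre_count_partitions_exact_parts n k) := by
  unfold Pre_count_partitions_exact_parts; infer_instance
def pvWitness_count_partitions_exact_parts : Int × Int := (7, 3)

def Spec_count_partitions_exact_parts (n : Int) (k : Int) (out : Int) : Prop := out = count_partitions_exact_parts_alt n k
instance (n : Int) (k : Int) (out : Int) : Decidable (Spec_count_partitions_exact_parts n k out) := by unfold Spec_count_partitions_exact_parts; infer_instance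

-- ===== CLAIM (what is proved, stated in full; the proofs are below) =====
def Claim_equal_count_partitions_exact_parts : Prop := ∀ (n : Int) (k : Int), Dom_count_partitions_exact_parts n k → Pre_count_partitions_exact_parts n k → Spec_count_partitions_exact_parts n k (count_partitions_exact_parts n k)
-- ===== LEMMAS AND PROOFS =====

def pE : Nat → Nat → Int
  | 0, 0 => 1
  | 0, _+1 => 0
  | _+1, 0 => 0
  | i+1, j+1 => if j ≤ i then pE i j + pE (i - j) (j+1) else pE i j
termination_by i _ => i
decreasing_by all_goals omega

def pAM : Nat → Nat → Int
  | m, 0 => if m = 0 then 1 else 0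
  | m, s+1 => pAM m s + (if _h : s + 1 ≤ m then pAM (m - (s+1)) (s+1) else 0)
termination_by m s => (s, m)
decreasing_by all_goals (first | exact Prod.Lex.left _ _ (by omega) | exact Prod.Lex.right _ (by omega))

lemma pE_zero_zero : pE 0 0 = 1 := by rw [pE]
lemma pE_zero_succ (j : Nat) : pE 0 (j+1) = 0 := by rw [pE]
lemma pE_succ_zero (i : Nat) : pE (i+1) 0 = 0 := by rw [pE]
lemma pE_succ_succ (i j : Nat) : pE (i+1) (j+1) = if j ≤ i then pE i j + pE (i-j) (j+1) else pE i j := by rw [pE]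

lemma pAM_zero (m : Nat) : pAM m 0 = if m = 0 then 1 else 0 := by rw [pAM]
lemma pAM_succ_le (m s : Nat) (h : s+1 ≤ m) : pAM m (s+1) = pAM m s + pAM (m-(s+1)) (s+1) := by
  rw [pAM, dif_pos h]
lemma pAM_succ_of_lt (m s : Nat) (h : m < s + 1) : pAM m (s+1) = pAM m s := by
  rw [pAM, dif_neg (by omega), add_zero]

lemma pE_zero_right (i : Nat) : pE i 0 = if i = 0 then 1 else 0 := by
  cases i with
  | zero => simp [pE_zero_zero]
  | succ i => simp [pE_succ_zero]

lemma pE_eq_zero_of_lt : ∀ i j : Nat, i < j → pE i j = 0 := by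
  intro i
  induction i with
  | zero => intro j hj; cases j with | zero => omega | succ j => exact pE_zero_succ j
  | succ i ih =>
    intro j hj
    cases j with
    | zero => omega
    | succ j => rw [pE_succ_succ, if_neg (by omega)]; exact ih j (by omega)

lemma bridge (m : Nat) : ∀ k : Nat, pE (m + k) k = pAM m k := by
  induction m using Nat.strong_induction_on with
  | _ m ihm =>
    intro k
    induction k with
    | zero => rw [Nat.add_zero, pAM_zero, pE_zero_right]
    | succ k ihk =>
      have h1 : pE (m + (k+1)) (k+1) = pE (m + k) k + pE m (k+1) := by
        have he : m + (k+1) = (m + k) + 1 := by omega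
        rw [he, pE_succ_succ, if_pos (by omega)]
        congr 2
        omega
      rw [h1, ihk]
      by_cases hmk : k + 1 ≤ m
      · have h2 : pE m (k+1) = pAM (m - (k+1)) (k+1) := by
          have := ihm (m - (k+1)) (by omega) (k+1)
          rwa [Nat.sub_add_cancel hmk] at this
        rw [h2, pAM_succ_le m k hmk]
      · rw [pE_eq_zero_of_lt m (k+1) (by omega), pAM_succ_of_lt m k (by omega), add_zero]

lemma getD_set' {α : Type} (l : List α) (i t : Nat) (v d : α) (hi : i < l.length) :
    (l.set i v).getD t d = if t = i then v else l.getD t d := by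
  by_cases h : t = i
  · subst h; simp [List.getD_eq_getElem?_getD, List.getElem?_set_self hi]
  · rw [if_neg h]
    simp [List.getD_eq_getElem?_getD, List.getElem?_set_ne (Ne.symm h)]

lemma B_inner (s m : Nat) (hs : 1 ≤ s) :
    ∀ (fuel lo : Nat) (W : List Int),
      lo + fuel = m + 1 → s ≤ lo → W.length = m + 1 →
      (∀ t, t < lo → W.getD t 0 = pAM t s) →
      (∀ t, lo ≤ t → t ≤ m → W.getD t 0 = pAM t (s-1)) →
      (((PySem.List.pyRange (lo:Int) ((m:Int)+1) 1).foldl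
        (fun ws t => PySem.List.pySetD ws t
          (PySem.List.pyGetD ws t 0 + PySem.List.pyGetD ws (t-(s:Int)) 0)) W).length = m + 1 ∧
       ∀ t, t ≤ m → ((PySem.List.pyRange (lo:Int) ((m:Int)+1) 1).foldl
        (fun ws t => PySem.List.pySetD ws t
          (PySem.List.pyGetD ws t 0 + PySem.List.pyGetD ws (t-(s:Int)) 0)) W).getD t 0 = pAM t s) := by
  intro fuel
  induction fuel with
  | zero =>
    intro lo W hfuel hslo hlen h1 h2
    rw [PySem.List.pyRange_one_eq_nil (by omega)]
    exact ⟨hlen, fun t ht => h1 t (by omega)⟩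
  | succ fuel ih =>
    intro lo W hfuel hslo hlen h1 h2
    have hlom : lo ≤ m := by omega
    rw [PySem.List.pyRange_one_cons (by omega), List.foldl_cons]
    have hstep : (PySem.List.pySetD W (lo:Int)
        (PySem.List.pyGetD W (lo:Int) 0 + PySem.List.pyGetD W ((lo:Int)-(s:Int)) 0))
        = W.set lo (pAM lo s) := by
      rw [← Nat.cast_sub hslo, PySem.List.pySetD_natCast, PySem.List.pyGetD_natCast,
        PySem.List.pyGetD_natCast]
      congr 1
      rw [h2 lo (le_refl lo) hlom, h1 (lo - s) (by omega)]
      obtain ⟨s', rfl⟩ : ∃ s', s = s'+1 := ⟨s-1, by omega⟩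
      rw [pAM_succ_le lo s' (by omega)]
      simp
    rw [hstep]
    have hc1 : ((lo:Int)+1) = ((lo+1 : Nat):Int) := by push_cast; ring
    rw [hc1]
    apply ih (lo+1) (W.set lo (pAM lo s)) (by omega) (by omega) (by simp [hlen])
    · intro t ht
      rw [getD_set' _ _ _ _ _ (by omega : lo < W.length)]
      by_cases he : t = lo
      · rw [if_pos he, he]
      · rw [if_neg he]
        exact h1 t (by omega)
    · intro t ht1 ht2
      rw [getD_set' _ _ _ _ _ (by omega : lo < W.length), if_neg (by omega)]
      exact h2 t (by omega) ht2

lemma B_outer (k m : Nat) :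
    ∀ (fuel s0 : Nat) (W : List Int),
      1 ≤ s0 → s0 + fuel = k + 1 → W.length = m + 1 →
      (∀ t, t ≤ m → W.getD t 0 = pAM t (s0-1)) →
      (((PySem.List.pyRange (s0:Int) ((k:Int)+1) 1).foldl
        (fun ws s => (PySem.List.pyRange s ((m:Int)+1) 1).foldl
          (fun ws t => PySem.List.pySetD ws t
            (PySem.List.pyGetD ws t 0 + PySem.List.pyGetD ws (t-s) 0)) ws) W).length = m + 1 ∧
       ∀ t, t ≤ m → ((PySem.List.pyRange (s0:Int) ((k:Int)+1) 1).foldl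
        (fun ws s => (PySem.List.pyRange s ((m:Int)+1) 1).foldl
          (fun ws t => PySem.List.pySetD ws t
            (PySem.List.pyGetD ws t 0 + PySem.List.pyGetD ws (t-s) 0)) ws) W).getD t 0 = pAM t k) := by
  intro fuel
  induction fuel with
  | zero =>
    intro s0 W hs0 hfuel hlen h1
    rw [PySem.List.pyRange_one_eq_nil (by omega)]
    refine ⟨hlen, fun t ht => ?_⟩
    have : s0 - 1 = k := by omega
    rw [← this]
    exact h1 t ht
  | succ fuel ih =>
    intro s0 W hs0 hfuel hlen h1
    rw [PySem.List.pyRange_one_cons (by omega), List.foldl_cons]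
    have hc1 : ((s0:Int)+1) = ((s0+1 : Nat):Int) := by push_cast; ring
    by_cases hsm : s0 ≤ m + 1
    · obtain ⟨hW1len, hW1⟩ := B_inner s0 m hs0 (m+1-s0) s0 W (by omega) (le_refl s0) hlen
        (fun t ht => by
          rw [h1 t (by omega)]
          obtain ⟨s', rfl⟩ : ∃ s', s0 = s'+1 := ⟨s0-1, by omega⟩
          rw [pAM_succ_of_lt t s' (by omega)]
          simp)
        (fun t ht1 ht2 => h1 t ht2)
      rw [hc1]
      apply ih (s0+1) _ (by omega) (by omega) hW1len
      intro t ht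
      have : s0 + 1 - 1 = s0 := by omega
      rw [this]
      exact hW1 t ht
    · rw [PySem.List.pyRange_one_eq_nil (by omega : ((m:Int)+1) ≤ (s0:Int)), List.foldl_nil, hc1]
      apply ih (s0+1) W (by omega) (by omega) hlen
      intro t ht
      rw [h1 t ht]
      obtain ⟨s', rfl⟩ : ∃ s', s0 = s'+1 := ⟨s0-1, by omega⟩
      simp only [Nat.add_sub_cancel]
      rw [pAM_succ_of_lt t s' (by omega)]

lemma alt_eq (n k : Int) (M K : Nat) (hM : n - k = (M:Int)) (hK : k = (K:Int)) :
    count_partitions_exact_parts_alt n k = pAM M K := by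
  obtain ⟨hL, hG⟩ := B_outer K M K 1 (1 :: List.replicate M 0)
    (le_refl 1) (by omega) (by simp) (fun t ht => by
      cases t with
      | zero => simp [pAM_zero]
      | succ t =>
        rw [pAM_zero]
        simp [List.getD_eq_getElem?_getD, Nat.lt_of_succ_le ht])
  simp only [count_partitions_exact_parts_alt]
  rw [if_neg (by omega), hM, hK]
  simp only [Int.toNat_natCast, Nat.cast_one] at *
  rw [PySem.List.pyGetD_natCast]
  exact hG M (le_refl M)

def g (dp : List (List Int)) (r j : Nat) : Int := (dp.getD r ([]:List Int)).getD j 0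

lemma g_set (dp : List (List Int)) (i jn : Nat) (v : Int) (hdp : i < dp.length)
    (hrow : jn < (dp.getD i []).length) (r j : Nat) :
    g (dp.set i ((dp.getD i []).set jn v)) r j
      = if r = i then (if j = jn then v else g dp i j) else g dp r j := by
  unfold g
  rw [getD_set' _ _ _ _ _ hdp]
  by_cases hr : r = i
  · subst hr
    rw [if_pos rfl, if_pos rfl, getD_set' _ _ _ _ _ hrow]
  · rw [if_neg hr, if_neg hr]

lemma len_set_row (dp : List (List Int)) (i jn : Nat) (v : Int) (hdp : i < dp.length) (r : Nat) :
    ((dp.set i ((dp.getD i []).set jn v)).getD r []).length = (dp.getD r []).length := by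
  rw [getD_set' _ _ _ _ _ hdp]
  by_cases hr : r = i
  · rw [if_pos hr, hr]; simp
  · rw [if_neg hr]

lemma A_inner (K N i : Nat) (hi : 1 ≤ i) (hiN : i ≤ N) :
    ∀ (fuel j0 : Nat) (dp : List (List Int)),
      1 ≤ j0 → j0 + fuel = K + 1 →
      dp.length = N + 1 →
      (∀ r, r ≤ N → (dp.getD r []).length = K + 1) →
      (∀ r, r < i → ∀ j, j ≤ K → g dp r j = pE r j) →
      (∀ j, j < j0 → g dp i j = pE i j) →
      (∀ j, j0 ≤ j → j ≤ K → g dp i j = 0) →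
      (∀ r, i < r → r ≤ N → ∀ j, j ≤ K → g dp r j = 0) →
      (let F := fun (dp : List (List Int)) (j : Int) =>
        let v : Int :=
          if (i:Int) ≥ j then
            PySem.List.pyGetD (PySem.List.pyGetD dp ((i:Int)-1) []) (j-1) 0
              + PySem.List.pyGetD (PySem.List.pyGetD dp ((i:Int)-j) []) j 0
          else
            PySem.List.pyGetD (PySem.List.pyGetD dp ((i:Int)-1) []) (j-1) 0
        PySem.List.pySetD dp (i:Int) (PySem.List.pySetD (PySem.List.pyGetD dp (i:Int) []) j v)
       let dp' := (PySem.List.pyRange (j0:Int) ((K:Int)+1) 1).foldl F dp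
       dp'.length = N + 1 ∧
       (∀ r, r ≤ N → (dp'.getD r []).length = K + 1) ∧
       (∀ r, r < i → ∀ j, j ≤ K → g dp' r j = pE r j) ∧
       (∀ j, j ≤ K → g dp' i j = pE i j) ∧
       (∀ r, i < r → r ≤ N → ∀ j, j ≤ K → g dp' r j = 0)) := by
  intro fuel
  induction fuel with
  | zero =>
    intro j0 dp hj0 hfuel h3 h4 h5 h6 h7 h8
    simp only
    rw [PySem.List.pyRange_one_eq_nil (by omega), List.foldl_nil]
    exact ⟨h3, h4, h5, fun j hj => h6 j (by omega), h8⟩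
  | succ fuel ih =>
    intro j0 dp hj0 hfuel h3 h4 h5 h6 h7 h8
    simp only
    rw [PySem.List.pyRange_one_cons (by omega), List.foldl_cons]
    have hdp : i < dp.length := by omega
    have hrowlen : (dp.getD i []).length = K + 1 := h4 i hiN
    have c1 : ((i:Int) - 1) = ((i-1 : Nat) : Int) := by omega
    have c2 : ((j0:Int) - 1) = ((j0-1 : Nat) : Int) := by omega
    -- the loop body writes pE i j0 into dp[i][j0]
    have hstep :
        (let v : Int :=
          if (i:Int) ≥ (j0:Int) then
            PySem.List.pyGetD (PySem.List.pyGetD dp ((i:Int)-1) []) ((j0:Int)-1) 0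
              + PySem.List.pyGetD (PySem.List.pyGetD dp ((i:Int)-(j0:Int)) []) (j0:Int) 0
          else
            PySem.List.pyGetD (PySem.List.pyGetD dp ((i:Int)-1) []) ((j0:Int)-1) 0
         PySem.List.pySetD dp (i:Int) (PySem.List.pySetD (PySem.List.pyGetD dp (i:Int) []) (j0:Int) v))
        = dp.set i ((dp.getD i []).set j0 (pE i j0)) := by
      simp only [PySem.List.pyGetD_natCast, PySem.List.pySetD_natCast]
      congr 1
      congr 1
      obtain ⟨i', rfl⟩ : ∃ i', i = i'+1 := ⟨i-1, by omega⟩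
      obtain ⟨j', rfl⟩ : ∃ j', j0 = j'+1 := ⟨j0-1, by omega⟩
      rw [pE_succ_succ]
      by_cases hji : j'+1 ≤ i'+1
      · rw [if_pos (by omega : ((i'+1:Nat):Int) ≥ ((j'+1:Nat):Int)), if_pos (by omega : j' ≤ i')]
        have c3 : ((i'+1:Nat):Int) - ((j'+1:Nat):Int) = ((i'+1-(j'+1) : Nat) : Int) := by omega
        rw [c1, c2, c3]
        simp only [PySem.List.pyGetD_natCast, Nat.add_sub_cancel]
        have e1 : (dp.getD i' []).getD j' 0 = pE i' j' := h5 i' (by omega) j' (by omega)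
        have e2 : (dp.getD (i'+1-(j'+1)) []).getD (j'+1) 0 = pE (i'+1-(j'+1)) (j'+1) :=
          h5 (i'+1-(j'+1)) (by omega) (j'+1) (by omega)
        rw [e1, e2]
        have c4 : i'+1-(j'+1) = i' - j' := by omega
        rw [c4]
      · rw [if_neg (by omega : ¬ ((i'+1:Nat):Int) ≥ ((j'+1:Nat):Int)), if_neg (by omega : ¬ j' ≤ i')]
        rw [c1, c2]
        simp only [PySem.List.pyGetD_natCast, Nat.add_sub_cancel]
        exact h5 i' (by omega) j' (by omega)
    rw [hstep]
    have hc1 : ((j0:Int)+1) = ((j0+1 : Nat):Int) := by push_cast; ring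
    rw [hc1]
    have hrow : j0 < (dp.getD i []).length := by omega
    have hg := g_set dp i j0 (pE i j0) hdp hrow
    have hlen := len_set_row dp i j0 (pE i j0) hdp
    apply ih (j0+1) _ (by omega) (by omega) (by simp [h3])
    · intro r hr; rw [hlen r]; exact h4 r hr
    · intro r hr j hj; rw [hg r j, if_neg (by omega)]; exact h5 r hr j hj
    · intro j hj
      rw [hg i j, if_pos rfl]
      by_cases hjj : j = j0
      · rw [if_pos hjj, hjj]
      · rw [if_neg hjj]; exact h6 j (by omega)
    · intro j hj1 hj2
      rw [hg i j, if_pos rfl, if_neg (by omega)]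
      exact h7 j (by omega) hj2
    · intro r hr1 hr2 j hj
      rw [hg r j, if_neg (by omega)]
      exact h8 r hr1 hr2 j hj

lemma A_outer (K N : Nat) :
    ∀ (fuel i0 : Nat) (dp : List (List Int)),
      1 ≤ i0 → i0 + fuel = N + 1 →
      dp.length = N + 1 →
      (∀ r, r ≤ N → (dp.getD r []).length = K + 1) →
      (∀ r, r < i0 → ∀ j, j ≤ K → g dp r j = pE r j) →
      (∀ r, i0 ≤ r → r ≤ N → ∀ j, j ≤ K → g dp r j = 0) →
      (let G := fun (dp : List (List Int)) (i : Int) =>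
        (PySem.List.pyRange 1 ((K:Int)+1) 1).foldl (fun dp j =>
          let v : Int :=
            if i ≥ j then
              PySem.List.pyGetD (PySem.List.pyGetD dp (i-1) []) (j-1) 0
                + PySem.List.pyGetD (PySem.List.pyGetD dp (i-j) []) j 0
            else
              PySem.List.pyGetD (PySem.List.pyGetD dp (i-1) []) (j-1) 0
          PySem.List.pySetD dp i (PySem.List.pySetD (PySem.List.pyGetD dp i []) j v)) dp
       let dp' := (PySem.List.pyRange (i0:Int) ((N:Int)+1) 1).foldl G dp
       ∀ r, r ≤ N → ∀ j, j ≤ K → g dp' r j = pE r j) := by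
  intro fuel
  induction fuel with
  | zero =>
    intro i0 dp hi0 hfuel h3 h4 h5 h6
    simp only
    rw [show PySem.List.pyRange (i0:Int) ((N:Int)+1) 1 = []
        from PySem.List.pyRange_one_eq_nil (by omega), List.foldl_nil]
    exact fun r hr j hj => h5 r (by omega) j hj
  | succ fuel ih =>
    intro i0 dp hi0 hfuel h3 h4 h5 h6
    simp only
    rw [show PySem.List.pyRange (i0:Int) ((N:Int)+1) 1
          = (i0:Int) :: PySem.List.pyRange ((i0:Int)+1) ((N:Int)+1) 1
        from PySem.List.pyRange_one_cons (by omega), List.foldl_cons]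
    have hi0N : i0 ≤ N := by omega
    obtain ⟨hL, hR, hP, hC, hZ⟩ := A_inner K N i0 hi0 hi0N K 1 dp (le_refl 1) (by omega) h3 h4
      (fun r hr j hj => h5 r hr j hj)
      (fun j hj => by
        obtain rfl : j = 0 := by omega
        obtain ⟨i', rfl⟩ : ∃ i', i0 = i'+1 := ⟨i0-1, by omega⟩
        rw [pE_succ_zero]
        exact h6 (i'+1) (le_refl _) (by omega) 0 (by omega))
      (fun j hj1 hj2 => h6 i0 (le_refl _) hi0N j hj2)
      (fun r hr1 hr2 j hj => h6 r (by omega) hr2 j hj)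
    have hc1 : ((i0:Int)+1) = ((i0+1 : Nat):Int) := by push_cast; ring
    rw [hc1]
    exact ih (i0+1) _ (by omega) (by omega) hL hR
      (fun r hr j hj => by
        by_cases hri : r = i0
        · subst hri; exact hC j hj
        · exact hP r (by omega) j hj)
      (fun r hr1 hr2 j hj => hZ r (by omega) hr2 j hj)

lemma A_eq (n k : Int) (N K : Nat) (hN : n = (N:Int)) (hK : k = (K:Int)) :
    count_partitions_exact_parts n k = pE N K := by
  subst hN; subst hK
  simp only [count_partitions_exact_parts]
  have hdp0 : (PySem.List.pyRange 0 ((N:Int)+1) 1).map (fun _ => List.replicate (((K:Int))+1).toNat (0:Int))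
      = List.replicate (N+1) (List.replicate (K+1) (0:Int)) := by
    rw [PySem.List.pyRange_one, List.map_map]
    have hcomp : ((fun (_ : Int) => List.replicate ((K:Int)+1).toNat (0:Int)) ∘ fun (k : Nat) => (0:Int) + (k:Int))
        = fun (_ : Nat) => List.replicate ((K:Int)+1).toNat (0:Int) := rfl
    rw [hcomp, List.map_const', List.length_range]
    have e1 : (((N:Int)+1-0)).toNat = N+1 := by omega
    have e2 : ((K:Int)+1).toNat = K+1 := by omega
    rw [e1, e2]
  rw [hdp0]
  have hdp1 : PySem.List.pySetD (List.replicate (N+1) (List.replicate (K+1) (0:Int))) 0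
      (PySem.List.pySetD (PySem.List.pyGetD (List.replicate (N+1) (List.replicate (K+1) (0:Int))) 0 []) 0 1)
      = (List.replicate (N+1) (List.replicate (K+1) (0:Int))).set 0 ((List.replicate (K+1) (0:Int)).set 0 1) := by
    rw [PySem.List.pyGetD_zero,
      PySem.List.pySetD_of_nonneg _ _ (by norm_num),
      PySem.List.pySetD_of_nonneg _ _ (by norm_num)]
    simp [List.getD_eq_getElem?_getD]
  rw [hdp1]
  set dp1 := (List.replicate (N+1) (List.replicate (K+1) (0:Int))).set 0 ((List.replicate (K+1) (0:Int)).set 0 1) with hdp1def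
  have hlen1 : dp1.length = N + 1 := by simp [hdp1def]
  have hrows1 : ∀ r, r ≤ N → (dp1.getD r []).length = K + 1 := by
    intro r hr
    rw [hdp1def]
    have h0 : (List.replicate (N+1) (List.replicate (K+1) (0:Int))).getD 0 []
        = List.replicate (K+1) (0:Int) := by simp [List.getD_eq_getElem?_getD]
    rw [← h0, getD_set' _ _ _ _ _ (by simp), h0]
    by_cases hr0 : r = 0
    · rw [if_pos hr0]; simp
    · rw [if_neg hr0]; simp [List.getD_eq_getElem?_getD, Nat.lt_succ_of_le hr]
  have hget1 : ∀ r j, r ≤ N → j ≤ K → g dp1 r j = if r = 0 ∧ j = 0 then 1 else 0 := by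
    intro r j hr hj
    unfold g
    rw [hdp1def]
    have h0 : (List.replicate (N+1) (List.replicate (K+1) (0:Int))).getD 0 []
        = List.replicate (K+1) (0:Int) := by simp [List.getD_eq_getElem?_getD]
    rw [← h0, getD_set' _ _ _ _ _ (by simp), h0]
    by_cases hr0 : r = 0
    · rw [if_pos hr0]
      rw [getD_set' _ _ _ _ _ (by simp)]
      by_cases hj0 : j = 0
      · rw [if_pos hj0, if_pos ⟨hr0, hj0⟩]
      · rw [if_neg hj0, if_neg (by tauto)]
        simp [List.getD_eq_getElem?_getD, Nat.lt_succ_of_le hj]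
    · rw [if_neg hr0, if_neg (by tauto)]
      simp [List.getD_eq_getElem?_getD, Nat.lt_succ_of_le hr, Nat.lt_succ_of_le hj]
  have hout := A_outer K N N 1 dp1 (le_refl 1) (by omega) hlen1 hrows1
    (fun r hr j hj => by
      obtain rfl : r = 0 := by omega
      rw [hget1 0 j (by omega) hj]
      cases j with
      | zero => simp [pE_zero_zero]
      | succ j => simp [pE_zero_succ])
    (fun r hr1 hr2 j hj => by
      rw [hget1 r j hr2 hj, if_neg (by omega)])
  simp only [PySem.List.pyGetD_natCast]
  exact hout N (le_refl N) K (le_refl K)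

-- A's table read dp[n][k] is the value of A's recurrence at (n.toNat, k.toNat).
lemma A_eq_final (n k : Int) (hn : 0 ≤ n) (hk : 0 ≤ k) :
    count_partitions_exact_parts n k = pE n.toNat k.toNat :=
  A_eq n k n.toNat k.toNat (by omega) (by omega)

-- ===== VERDICT (by name: the statement is the Claim_ definition above) =====
theorem count_partitions_exact_parts_spec : Claim_equal_count_partitions_exact_parts := by
  intro n k _hdom hpre
  obtain ⟨hn, hk⟩ := hpre
  unfold Spec_count_partitions_exact_parts
  rw [A_eq_final n k hn hk]
  by_cases hkn : k ≤ n
  · rw [alt_eq n k (n-k).toNat k.toNat (by omega) (by omega), ← bridge (n-k).toNat k.toNat]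
    congr 1
    omega
  · have h1 : count_partitions_exact_parts_alt n k = 0 := by
      simp only [count_partitions_exact_parts_alt]
      rw [if_pos (by omega)]
    rw [h1]
    exact pE_eq_zero_of_lt _ _ (by omega)
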